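-- pv_equiv track=rewrite | github.com/jakubtuchol/epi | src/heaps.py | find_closest_stars
-- ===== SOURCE A (Python) =====
-- class Heap(object):
--
--     def __init__(self, comp):
--         self._heap_list = [0]
--         self._cur_size = 0
--         self.comp = comp
--
--     def _perc_up(self, i):
--         while i // 2 > 0:
--             if self.comp(self._heap_list[i], self._heap_list[i // 2]):
--                 tmp = self._heap_list[i // 2]
--                 self._heap_list[i // 2] = self._heap_list[i]
--                 self._heap_list[i] = tmp
--             i = i // 2
--
--     def _perc_down(self, i):
--         while i * 2 <= self._cur_size:
--             mc = self._min_child(i)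
--             if not self.comp(self._heap_list[i], self._heap_list[mc]):
--                 tmp = self._heap_list[i]
--                 self._heap_list[i] = self._heap_list[mc]
--                 self._heap_list[mc] = tmp
--             i = mc
--
--     def _min_child(self, i):
--         if i * 2 + 1 > self._cur_size:
--             return i * 2
--
--         if self.comp(self._heap_list[i * 2], self._heap_list[i * 2 + 1]):
--             return i * 2
--         return i * 2 + 1
--
--     def insert(self, k):
--         self._heap_list.append(k)
--         self._cur_size += 1
--         self._perc_up(self._cur_size)
--
--     def pop(self):
--         retval = self._heap_list[1]
--         self._heap_list[1] = self._heap_list[self._cur_size]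
--         self._cur_size -= 1
--         self._heap_list.pop()
--         self._perc_down(1)
--         return retval
--
--     def peek(self):
--         return self._heap_list[1]
--
--     def build_heap(self, alist):
--         i = len(alist) // 2
--         self._cur_size = len(alist)
--         self._heap_list = [0] + alist[:]
--         while i > 0:
--             self._perc_down(i)
--             i -= 1
--
--     def empty(self):
--         return self._cur_size == 0
--
--     def size(self):
--         return self._cur_size
--
-- def find_closest_stars(limit, stars):
--     """
--     Question 11.4: Find k closest stars
--     to a location
--     """
--     # create max heap to handle keeping
--     # track of closest stars
--     heap = Heap(lambda x, y: x > y)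
--
--     for star in stars:
--         heap.insert(star)
--
--         if heap.size() > limit:
--             heap.pop()
--
--     closest_stars = []
--     while not heap.empty():
--         closest_stars.append(heap.pop())
--
--     return closest_stars
-- ===== SOURCE B (Python) =====
-- def find_closest_stars(limit, stars):
--     """k closest stars, reported largest-distance-first: sort once, keep the
--     smallest max(limit, 0), reverse."""
--     return sorted(stars)[:max(limit, 0)][::-1]
-- ===== Notes on version B (the rewrite author's own statement) =====
-- stated objective: simpler
-- what changed: Replaces the hand-written bounded max-heap (insert/percolate/pop loop plus a drain loop) by a single sort: sort ascending, take the first max(limit,0) elements, reverse.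
import Mathlib
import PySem

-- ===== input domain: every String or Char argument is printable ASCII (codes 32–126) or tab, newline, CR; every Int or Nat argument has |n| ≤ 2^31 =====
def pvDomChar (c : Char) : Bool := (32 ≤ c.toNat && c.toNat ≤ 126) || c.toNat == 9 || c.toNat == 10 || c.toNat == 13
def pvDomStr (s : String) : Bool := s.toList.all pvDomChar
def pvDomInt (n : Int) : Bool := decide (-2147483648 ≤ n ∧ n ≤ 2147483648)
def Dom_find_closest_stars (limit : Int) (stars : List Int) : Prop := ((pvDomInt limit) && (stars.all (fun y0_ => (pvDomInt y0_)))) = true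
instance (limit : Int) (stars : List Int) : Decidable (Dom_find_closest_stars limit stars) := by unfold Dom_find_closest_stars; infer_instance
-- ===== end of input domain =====

-- B replaces A's hand-written bounded max-heap by one sort + take + reverse (simpler, same results).

-- ===== PORT A =====
-- A keeps a 1-indexed heap list (index 0 is the unused sentinel) with `_cur_size` elements.
-- Every index A ever reads/writes is in range (indices 1.._cur_size into a list of length
-- _cur_size+1), so Python's l[i] is ported as getD (exact on all reached states).
def pvGet (l : List Int) (i : Nat) : Int := l.getD i 0

-- tmp = l[j]; l[j] = l[i]; l[i] = tmp
def pvSwap (l : List Int) (i j : Nat) : List Int :=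
  (l.set j (pvGet l i)).set i (pvGet l j)

-- Heap._perc_up (comp x y = x > y); the fuel argument only bounds the loop
-- (the cursor i halves each turn, so fuel = i always suffices)
def percUpGo : Nat → List Int → Nat → List Int
  | 0, l, _ => l
  | fuel + 1, l, i =>
    if 0 < i / 2 then
      percUpGo fuel (if pvGet l (i / 2) < pvGet l i then pvSwap l i (i / 2) else l) (i / 2)
    else l

def percUp (l : List Int) (i : Nat) : List Int := percUpGo i l i

-- Heap._min_child
def minChild (l : List Int) (n i : Nat) : Nat :=
  if n < i * 2 + 1 then i * 2
  else if pvGet l (i * 2 + 1) < pvGet l (i * 2) then i * 2 else i * 2 + 1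

-- Heap._perc_down; Python only ever calls it with i ≥ 1 (the 0 < i guard only makes the
-- recursion total; at i = 0 Python would loop forever, a state A never reaches)
-- (fuel only bounds the loop: the cursor at least doubles, so n + 1 - i suffices)
def percDownGo : Nat → List Int → Nat → Nat → List Int
  | 0, l, _, _ => l
  | fuel + 1, l, n, i =>
    if 0 < i ∧ i * 2 ≤ n then
      percDownGo fuel
        (if ¬ pvGet l (minChild l n i) < pvGet l i then pvSwap l i (minChild l n i) else l)
        n (minChild l n i)
    else l

def percDown (l : List Int) (n i : Nat) : List Int := percDownGo (n + 1 - i) l n i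

-- Heap.insert on the state (heap_list, cur_size)
def heapInsert (l : List Int) (n : Nat) (k : Int) : List Int × Nat :=
  (percUp (l ++ [k]) (n + 1), n + 1)

-- Heap.pop: returns (retval, new heap_list, new cur_size)
def heapPop (l : List Int) (n : Nat) : Int × List Int × Nat :=
  (pvGet l 1, percDown ((l.set 1 (pvGet l n)).dropLast) (n - 1) 1, n - 1)

-- the body of A's for-loop: insert, then pop if the heap exceeds limit
def fcsStep (limit : Int) (st : List Int × Nat) (star : Int) : List Int × Nat :=
  let st1 := heapInsert st.1 st.2 star
  if limit < (st1.2 : Int) then (heapPop st1.1 st1.2).2 else st1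

-- A's final while-loop: pop everything into the result list
-- (fuel only bounds the loop: the size drops by one each pop, so n suffices)
def drainGo : Nat → List Int → Nat → List Int
  | 0, _, _ => []
  | fuel + 1, l, n =>
    if n = 0 then []
    else (heapPop l n).1 :: drainGo fuel (heapPop l n).2.1 (heapPop l n).2.2

def drain (l : List Int) (n : Nat) : List Int := drainGo n l n

def find_closest_stars (limit : Int) (stars : List Int) : List Int :=
  let st := stars.foldl (fcsStep limit) ([0], 0)
  drain st.1 st.2

-- ===== PORT B =====
-- Source B: return sorted(stars)[:max(limit, 0)][::-1]
-- (slice [:k] with k = max(limit,0) ≥ 0 is `take k.toNat`; [::-1] is `reverse`)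
def find_closest_stars_alt (limit : Int) (stars : List Int) : List Int :=
  ((PySem.List.sorted stars (fun x => x) false).take (max limit 0).toNat).reverse

-- ===== PRECONDITION & SPEC =====
def Spec_find_closest_stars (limit : Int) (stars : List Int) (out : List Int) : Prop := out = find_closest_stars_alt limit stars
instance (limit : Int) (stars : List Int) (out : List Int) : Decidable (Spec_find_closest_stars limit stars out) := by unfold Spec_find_closest_stars; infer_instance

-- ===== CLAIM (what is proved, stated in full; the proofs are below) =====
def Claim_equal_find_closest_stars : Prop := ∀ (limit : Int) (stars : List Int), Dom_find_closest_stars limit stars → Spec_find_closest_stars limit stars (find_closest_stars limit stars)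

-- ===== LEMMAS AND PROOFS =====

-- the max-heap property of A's heap state: every node is ≤ its parent
def hOK (l : List Int) (n : Nat) : Prop :=
  ∀ j : Nat, 2 ≤ j → j ≤ n → pvGet l j ≤ pvGet l (j / 2)

lemma pvGet_set_self (l : List Int) (i : Nat) (a : Int) (h : i < l.length) :
    pvGet (l.set i a) i = a := by
  simp [pvGet, List.getD, h]

lemma pvGet_set_ne (l : List Int) (i j : Nat) (a : Int) (h : i ≠ j) :
    pvGet (l.set i a) j = pvGet l j := by
  simp [pvGet, List.getD, List.getElem?_set_ne h]

lemma length_pvSwap (l : List Int) (i j : Nat) : (pvSwap l i j).length = l.length := by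
  simp [pvSwap]

lemma pvGet_pvSwap_left (l : List Int) (i j : Nat) (h : i < l.length) :
    pvGet (pvSwap l i j) i = pvGet l j := by
  unfold pvSwap; rw [pvGet_set_self]; simpa

lemma pvGet_pvSwap_right (l : List Int) (i j : Nat) (hij : i ≠ j) (h : j < l.length) :
    pvGet (pvSwap l i j) j = pvGet l i := by
  unfold pvSwap; rw [pvGet_set_ne _ _ _ _ hij, pvGet_set_self _ _ _ h]

lemma pvGet_pvSwap_other (l : List Int) (i j m : Nat) (h1 : m ≠ i) (h2 : m ≠ j) :
    pvGet (pvSwap l i j) m = pvGet l m := by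
  unfold pvSwap; rw [pvGet_set_ne _ _ _ _ (Ne.symm h1), pvGet_set_ne _ _ _ _ (Ne.symm h2)]

-- swapping two in-range entries is a permutation
lemma cons_set_perm (t : List Int) (m : Nat) (a : Int) (hm : m < t.length) :
    List.Perm (t.getD m 0 :: t.set m a) (a :: t) := by
  induction t generalizing m with
  | nil => simp at hm
  | cons b t' ih =>
    cases m with
    | zero => simpa using List.Perm.swap a b t'
    | succ k =>
      simp only [List.getD_cons_succ, List.set_cons_succ]
      exact ((List.Perm.swap _ _ _).trans ((ih k (by simpa using hm)).cons b)).trans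
        (List.Perm.swap _ _ _)

lemma swap_perm (l : List Int) (i j : Nat) (hi : i < l.length) (hj : j < l.length) :
    List.Perm (pvSwap l i j) l := by
  induction l generalizing i j with
  | nil => simp at hi
  | cons a t ih =>
    unfold pvSwap pvGet
    cases i with
    | zero =>
      cases j with
      | zero => simp
      | succ m =>
        simp only [List.getD_cons_succ, List.set_cons_succ, List.getD_cons_zero,
          List.set_cons_zero]
        exact cons_set_perm t m a (by simpa using hj)
    | succ m =>
      cases j with
      | zero =>
        simp only [List.getD_cons_succ, List.set_cons_zero, List.set_cons_succ,
          List.getD_cons_zero]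
        exact cons_set_perm t m a (by simpa using hi)
      | succ k =>
        simp only [List.getD_cons_succ, List.set_cons_succ]
        exact ((ih m k (by simpa using hi) (by simpa using hj)).cons a)

-- with indices ≥ 1 the sentinel stays put, so the content (drop 1) is permuted
lemma ms_swap_tail (l : List Int) (i j : Nat) (hi1 : 1 ≤ i) (hj1 : 1 ≤ j)
    (hi : i < l.length) (hj : j < l.length) :
    (↑((pvSwap l i j).drop 1) : Multiset Int) = ↑(l.drop 1) := by
  cases l with
  | nil => simp at hi
  | cons v t =>
    obtain ⟨i', rfl⟩ : ∃ i', i = i' + 1 := ⟨i - 1, by omega⟩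
    obtain ⟨j', rfl⟩ : ∃ j', j = j' + 1 := ⟨j - 1, by omega⟩
    unfold pvSwap pvGet
    simp only [List.getD_cons_succ, List.set_cons_succ, List.drop_succ_cons, List.drop_zero]
    exact Multiset.coe_eq_coe.mpr
      (swap_perm t i' j' (by simpa using hi) (by simpa using hj))

-- ===== percolate-up =====

-- invariant of A's sift-up loop at cursor i: every parent edge holds except possibly
-- the one out of i, and the children of i do not exceed i's parent
def upInv (l : List Int) (n i : Nat) : Prop :=
  (∀ j, 2 ≤ j → j ≤ n → j ≠ i → pvGet l j ≤ pvGet l (j / 2)) ∧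
  (2 ≤ i → ∀ c, c / 2 = i → c ≤ n → pvGet l c ≤ pvGet l (i / 2))

lemma percUp_go : ∀ (fuel i : Nat) (l : List Int) (n : Nat), i ≤ fuel →
    l.length = n + 1 → 1 ≤ i → i ≤ n → upInv l n i →
    (percUpGo fuel l i).length = n + 1 ∧
    (↑((percUpGo fuel l i).drop 1) : Multiset Int) = ↑(l.drop 1) ∧
    hOK (percUpGo fuel l i) n := by
  intro fuel
  induction fuel with
  | zero => intro i l n hf _ hi _ _; exact absurd hi (by omega)
  | succ f ih =>
    intro i l n hf hlen hi1 hin hinv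
    simp only [percUpGo]
    by_cases h2 : 0 < i / 2
    · rw [if_pos h2]
      have hi2 : 2 ≤ i := by omega
      have hilen : i < l.length := by omega
      have hplen : i / 2 < l.length := by omega
      have hne : i ≠ i / 2 := by omega
      by_cases hc : pvGet l (i / 2) < pvGet l i
      · rw [if_pos hc]
        have gi : pvGet (pvSwap l i (i / 2)) i = pvGet l (i / 2) :=
          pvGet_pvSwap_left l i (i / 2) hilen
        have gp : pvGet (pvSwap l i (i / 2)) (i / 2) = pvGet l i :=
          pvGet_pvSwap_right l i (i / 2) hne hplen
        have go : ∀ m, m ≠ i → m ≠ i / 2 → pvGet (pvSwap l i (i / 2)) m = pvGet l m :=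
          fun m u v => pvGet_pvSwap_other l i (i / 2) m u v
        have hinv' : upInv (pvSwap l i (i / 2)) n (i / 2) := by
          constructor
          · intro j hj2 hjn hji2
            by_cases hji : j = i
            · subst hji; rw [gi, gp]; exact le_of_lt hc
            · by_cases hj2i : j / 2 = i
              · rw [go j hji (by omega), hj2i, gi]
                exact hinv.2 hi2 j hj2i hjn
              · by_cases hj2p : j / 2 = i / 2
                · rw [go j hji (by omega), hj2p, gp]
                  have h3 := hinv.1 j hj2 hjn hji
                  rw [hj2p] at h3
                  exact le_trans h3 (le_of_lt hc)
                · rw [go j hji (by omega), go (j / 2) hj2i hj2p]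
                  exact hinv.1 j hj2 hjn hji
          · intro h2p c hc2 hcn
            have hq : i / 2 / 2 ≠ i := by omega
            have hq2 : i / 2 / 2 ≠ i / 2 := by omega
            rw [go (i / 2 / 2) hq hq2]
            by_cases hci : c = i
            · rw [hci, gi]
              exact hinv.1 (i / 2) (by omega) (by omega) (by omega)
            · rw [go c hci (by omega)]
              refine le_trans ?_ (hinv.1 (i / 2) (by omega) (by omega) (by omega))
              have h3 := hinv.1 c (by omega) hcn hci
              rwa [hc2] at h3
        have R := ih (i / 2) (pvSwap l i (i / 2)) n (by omega)
          (by rw [length_pvSwap, hlen]) (by omega) (by omega) hinv'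
        refine ⟨R.1, ?_, R.2.2⟩
        rw [R.2.1]
        exact ms_swap_tail l i (i / 2) (by omega) (by omega) hilen hplen
      · rw [if_neg hc]
        have hinv' : upInv l n (i / 2) := by
          constructor
          · intro j hj2 hjn hji2
            by_cases hji : j = i
            · subst hji; exact not_lt.mp hc
            · exact hinv.1 j hj2 hjn hji
          · intro h2p c hc2 hcn
            have hchain : pvGet l (i / 2) ≤ pvGet l (i / 2 / 2) :=
              hinv.1 (i / 2) (by omega) (by omega) (by omega)
            by_cases hci : c = i
            · rw [hci]; exact le_trans (not_lt.mp hc) hchain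
            · refine le_trans ?_ hchain
              have h3 := hinv.1 c (by omega) hcn hci
              rwa [hc2] at h3
        exact ih (i / 2) l n (by omega) hlen (by omega) (by omega) hinv'
    · rw [if_neg h2]
      exact ⟨hlen, rfl, fun j hj2 hjn => hinv.1 j hj2 hjn (by omega)⟩

lemma percUp_spec (i : Nat) (l : List Int) (n : Nat) (hlen : l.length = n + 1)
    (hi1 : 1 ≤ i) (hin : i ≤ n) (hinv : upInv l n i) :
    (percUp l i).length = n + 1 ∧
    (↑((percUp l i).drop 1) : Multiset Int) = ↑(l.drop 1) ∧
    hOK (percUp l i) n :=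
  percUp_go i i l n (le_refl i) hlen hi1 hin hinv

-- ===== percolate-down =====

def downInv (l : List Int) (n i : Nat) : Prop :=
  (∀ j, 2 ≤ j → j ≤ n → j / 2 ≠ i → pvGet l j ≤ pvGet l (j / 2)) ∧
  (2 ≤ i → ∀ c, c / 2 = i → c ≤ n → pvGet l c ≤ pvGet l (i / 2))

lemma minChild_facts (l : List Int) (n i : Nat) (hi : 0 < i) (h2 : i * 2 ≤ n) :
    (minChild l n i) / 2 = i ∧ i < minChild l n i ∧ minChild l n i ≤ n ∧
    (∀ c, c / 2 = i → c ≤ n → pvGet l c ≤ pvGet l (minChild l n i)) := by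
  unfold minChild
  split_ifs with h1 hcmp
  · refine ⟨by omega, by omega, by omega, ?_⟩
    intro c hc hcn
    have hce : c = i * 2 := by omega
    rw [hce]
  · refine ⟨by omega, by omega, by omega, ?_⟩
    intro c hc hcn
    have hcc : c = i * 2 ∨ c = i * 2 + 1 := by omega
    rcases hcc with rfl | rfl
    · exact le_refl _
    · exact le_of_lt hcmp
  · refine ⟨by omega, by omega, by omega, ?_⟩
    intro c hc hcn
    have hcc : c = i * 2 ∨ c = i * 2 + 1 := by omega
    rcases hcc with rfl | rfl
    · exact not_lt.mp hcmp
    · exact le_refl _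

lemma percDown_go : ∀ (fuel : Nat) (l : List Int) (n i : Nat), n + 1 - i ≤ fuel →
    l.length = n + 1 → 1 ≤ i → downInv l n i →
    (percDownGo fuel l n i).length = n + 1 ∧
    (↑((percDownGo fuel l n i).drop 1) : Multiset Int) = ↑(l.drop 1) ∧
    hOK (percDownGo fuel l n i) n := by
  intro fuel
  induction fuel with
  | zero =>
    intro l n i hf hlen hi hinv
    simp only [percDownGo]
    refine ⟨hlen, by trivial, ?_⟩
    intro j hj2 hjn
    exact hinv.1 j hj2 hjn (by omega)
  | succ f ih =>
    intro l n i hf hlen hi hinv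
    simp only [percDownGo]
    by_cases hg : 0 < i ∧ i * 2 ≤ n
    · rw [if_pos hg]
      obtain ⟨hi0, h2i⟩ := hg
      obtain ⟨hmc2, hmcgt, hmcn, hmax⟩ := minChild_facts l n i hi0 h2i
      by_cases hv : pvGet l (minChild l n i) < pvGet l i
      · rw [if_neg (not_not_intro hv)]
        apply ih l n (minChild l n i) (by omega) hlen (by omega)
        constructor
        · intro j hj2 hjn hj2mc
          by_cases hj2i : j / 2 = i
          · rw [hj2i]; exact le_trans (hmax j hj2i hjn) (le_of_lt hv)
          · exact hinv.1 j hj2 hjn hj2i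
        · intro _ c hc2 hcn
          rw [hmc2]
          refine le_trans ?_ (le_of_lt hv)
          have h3 := hinv.1 c (by omega) hcn (by omega)
          rwa [hc2] at h3
      · rw [if_pos hv]
        have hilen : i < l.length := by omega
        have hmclen : minChild l n i < l.length := by omega
        have hneq : i ≠ minChild l n i := by omega
        have gi : pvGet (pvSwap l i (minChild l n i)) i = pvGet l (minChild l n i) :=
          pvGet_pvSwap_left l i (minChild l n i) hilen
        have gmc : pvGet (pvSwap l i (minChild l n i)) (minChild l n i) = pvGet l i :=
          pvGet_pvSwap_right l i (minChild l n i) hneq hmclen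
        have go : ∀ m, m ≠ i → m ≠ minChild l n i →
            pvGet (pvSwap l i (minChild l n i)) m = pvGet l m :=
          fun m u v => pvGet_pvSwap_other l i (minChild l n i) m u v
        have hinv' : downInv (pvSwap l i (minChild l n i)) n (minChild l n i) := by
          constructor
          · intro j hj2 hjn hj2mc
            by_cases hjmc : j = minChild l n i
            · subst hjmc; rw [gmc, hmc2, gi]; exact not_lt.mp hv
            · by_cases hj2i : j / 2 = i
              · rw [go j (by omega) hjmc, hj2i, gi]
                exact hmax j hj2i hjn
              · by_cases hji : j = i
                · subst hji
                  rw [gi, go (j / 2) (by omega) (by omega)]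
                  exact hinv.2 hj2 (minChild l n j) hmc2 hmcn
                · rw [go j hji hjmc, go (j / 2) hj2i hj2mc]
                  exact hinv.1 j hj2 hjn hj2i
          · intro _ c hc2 hcn
            rw [hmc2, gi, go c (by omega) (by omega)]
            have h3 := hinv.1 c (by omega) hcn (by omega)
            rwa [hc2] at h3
        have R := ih (pvSwap l i (minChild l n i)) n (minChild l n i) (by omega)
          (by rw [length_pvSwap, hlen]) (by omega) hinv'
        refine ⟨R.1, ?_, R.2.2⟩
        rw [R.2.1]
        exact ms_swap_tail l i (minChild l n i) (by omega) (by omega) hilen hmclen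
    · rw [if_neg hg]
      refine ⟨hlen, rfl, ?_⟩
      intro j hj2 hjn
      by_cases hj2i : j / 2 = i
      · exfalso; omega
      · exact hinv.1 j hj2 hjn hj2i

lemma percDown_spec (l : List Int) (n i : Nat) (hlen : l.length = n + 1)
    (hi : 1 ≤ i) (hinv : downInv l n i) :
    (percDown l n i).length = n + 1 ∧
    (↑((percDown l n i).drop 1) : Multiset Int) = ↑(l.drop 1) ∧
    hOK (percDown l n i) n :=
  percDown_go (n + 1 - i) l n i (le_refl _) hlen hi hinv

-- ===== heap operations =====

lemma pvGet_le_root (l : List Int) (n : Nat) (hH : hOK l n) :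
    ∀ j, 1 ≤ j → j ≤ n → pvGet l j ≤ pvGet l 1 := by
  intro j
  induction j using Nat.strong_induction_on with
  | _ j ihj =>
    intro hj1 hjn
    rcases Nat.lt_or_ge j 2 with h | h
    · have : j = 1 := by omega
      rw [this]
    · exact le_trans (hH j h hjn) (ihj (j / 2) (by omega) (by omega) (by omega))

lemma pvGet_append (l : List Int) (k : Int) (j : Nat) (h : j < l.length) :
    pvGet (l ++ [k]) j = pvGet l j := by
  simp [pvGet, List.getD, List.getElem?_append_left h]

lemma heapInsert_spec (l : List Int) (n : Nat) (k : Int)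
    (hlen : l.length = n + 1) (hH : hOK l n) :
    (heapInsert l n k).2 = n + 1 ∧ (heapInsert l n k).1.length = (n + 1) + 1 ∧
    hOK (heapInsert l n k).1 (n + 1) ∧
    (↑((heapInsert l n k).1.drop 1) : Multiset Int) = ↑(l.drop 1) + {k} := by
  have hlen2 : (l ++ [k]).length = (n + 1) + 1 := by simp [hlen]
  have hup : upInv (l ++ [k]) (n + 1) (n + 1) := by
    constructor
    · intro j hj2 hjn hne
      rw [pvGet_append l k j (by omega), pvGet_append l k (j / 2) (by omega)]
      exact hH j hj2 (by omega)
    · intro _ c hc2 hcn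
      exfalso; omega
  obtain ⟨L, M, K⟩ := percUp_spec (n + 1) (l ++ [k]) (n + 1) hlen2 (by omega) (le_refl _) hup
  refine ⟨rfl, L, K, ?_⟩
  show (↑((percUp (l ++ [k]) (n + 1)).drop 1) : Multiset Int) = ↑(l.drop 1) + {k}
  rw [M]
  rw [List.drop_append_of_le_length (by omega)]
  rw [← Multiset.coe_singleton, ← Multiset.coe_add]

lemma heapPop_spec (l : List Int) (n : Nat)
    (hlen : l.length = n + 1) (hn : 1 ≤ n) (hH : hOK l n) :
    (heapPop l n).2.2 = n - 1 ∧ (heapPop l n).2.1.length = (n - 1) + 1 ∧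
    hOK (heapPop l n).2.1 (n - 1) ∧
    (heapPop l n).1 ∈ l.drop 1 ∧ (∀ y ∈ l.drop 1, y ≤ (heapPop l n).1) ∧
    (↑((heapPop l n).2.1.drop 1) : Multiset Int) =
      (↑(l.drop 1) : Multiset Int).erase ((heapPop l n).1) := by
  obtain ⟨m, rfl⟩ : ∃ m, n = m + 1 := ⟨n - 1, by omega⟩
  obtain ⟨v, t, rfl⟩ : ∃ v t, l = v :: t := by
    cases l with
    | nil => simp at hlen
    | cons v t => exact ⟨v, t, rfl⟩
  obtain ⟨a, t', rfl⟩ : ∃ a t', t = a :: t' := by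
    cases t with
    | nil => simp at hlen
    | cons a t' => exact ⟨a, t', rfl⟩
  have ht' : t'.length = m := by simpa using hlen
  have hr : pvGet (v :: a :: t') 1 = a := by simp [pvGet]
  have hb : pvGet (v :: a :: t') (m + 1) = (a :: t').getD m 0 := by
    simp [pvGet]
  have hset : (v :: a :: t').set 1 (pvGet (v :: a :: t') (m + 1)) =
      v :: ((a :: t').getD m 0) :: t' := by
    rw [hb]; rfl
  have hpop : heapPop (v :: a :: t') (m + 1) =
      (a, percDown (v :: (((a :: t').getD m 0) :: t').dropLast) m 1, m) := by
    unfold heapPop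
    rw [hr, hset]
    rfl
  set b := (a :: t').getD m 0 with hbdef
  have hdl : ((b :: t').dropLast).length = m := by simp [ht']
  have hl2len : (v :: (b :: t').dropLast).length = m + 1 := by simp [hdl]
  -- entries 2..m of the working list are the old entries
  have keep : ∀ j, 2 ≤ j → j ≤ m → pvGet (v :: (b :: t').dropLast) j = pvGet (v :: a :: t') j := by
    intro j hj2 hjm
    obtain ⟨p, rfl⟩ : ∃ p, j = p + 2 := ⟨j - 2, by omega⟩
    have hp1 : p + 1 < ((b :: t').dropLast).length := by omega
    have hpt : p < t'.length := by omega
    show ((b :: t').dropLast).getD (p + 1) 0 = (a :: t').getD (p + 1) 0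
    rw [List.getD_eq_getElem _ _ hp1, List.getElem_dropLast]
    have hpt2 : p + 1 < (a :: t').length := by simp; omega
    rw [List.getD_eq_getElem _ _ hpt2]
    simp
  have hinv : downInv (v :: (b :: t').dropLast) m 1 := by
    constructor
    · intro j hj2 hjm hj21
      have hjh : j / 2 ≠ 1 := hj21
      rw [keep j hj2 hjm, keep (j / 2) (by omega) (by omega)]
      exact hH j hj2 (by omega)
    · intro h; exact absurd h (by omega)
  obtain ⟨PL, PM, PH⟩ := percDown_spec (v :: (b :: t').dropLast) m 1 hl2len (le_refl _) hinv
  rw [hpop]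
  refine ⟨rfl, by simpa using PL, by simpa using PH, by simp, ?_, ?_⟩
  · -- every content element is ≤ the root a
    intro y hy
    simp only [List.drop_succ_cons, List.drop_zero] at hy
    obtain ⟨idx, hidx, rfl⟩ := List.mem_iff_getElem.mp hy
    have hidx2 : idx + 1 < (v :: a :: t').length := by simp at hidx ⊢; omega
    have hgv : pvGet (v :: a :: t') (idx + 1) = (a :: t')[idx] := by
      rw [pvGet, List.getD_eq_getElem _ _ hidx2]
      simp
    rw [← hgv, ← hr]
    exact pvGet_le_root (v :: a :: t') (m + 1) hH (idx + 1) (by omega)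
      (by simp at hidx; omega)
  · -- multiset: content loses one copy of the max a
    show (↑((percDown (v :: (b :: t').dropLast) m 1).drop 1) : Multiset Int) =
      (↑((v :: a :: t').drop 1) : Multiset Int).erase a
    rw [PM]
    simp only [List.drop_succ_cons, List.drop_zero]
    rw [show ((↑(a :: t') : Multiset Int)) = a ::ₘ ↑t' from (Multiset.cons_coe a t').symm]
    rw [Multiset.erase_cons_head]
    -- goal: ↑((b :: t').dropLast) = ↑t'
    cases t' with
    | nil => simp
    | cons c t'' =>
      have hm1 : 1 ≤ m := by simp at ht'; omega
      have hne : (c :: t'') ≠ [] := by simp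
      have hbl : b = (c :: t'').getLast hne := by
        rw [hbdef, List.getLast_eq_getElem]
        have hml : m - 1 < (c :: t'').length := by simp at ht' ⊢; omega
        rw [show (a :: c :: t'').getD m 0 = (c :: t'').getD (m - 1) 0 by
          obtain ⟨q, rfl⟩ : ∃ q, m = q + 1 := ⟨m - 1, by omega⟩
          simp]
        rw [List.getD_eq_getElem _ _ hml]
        congr 1
        simp at ht' ⊢; omega
      have hexp : (b :: c :: t'').dropLast = b :: (c :: t'').dropLast := by
        rw [List.dropLast_cons₂]
      rw [hexp]
      have hsplit : (↑(c :: t'') : Multiset Int) =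
          ↑((c :: t'').dropLast) + {(c :: t'').getLast hne} := by
        conv_lhs => rw [← List.dropLast_append_getLast hne]
        rw [← Multiset.coe_singleton, ← Multiset.coe_add]
      rw [← Multiset.cons_coe, hbl, hsplit, add_comm, Multiset.singleton_add]

-- ===== the drain loop =====

lemma drain_zero (l : List Int) : drain l 0 = [] := rfl

lemma drain_succ (l : List Int) (n : Nat) :
    drain l (n + 1) =
      (heapPop l (n + 1)).1 :: drain (heapPop l (n + 1)).2.1 (heapPop l (n + 1)).2.2 := by
  show drainGo (n + 1) l (n + 1) = _
  simp only [drainGo]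
  rw [if_neg (Nat.succ_ne_zero n)]
  rfl

lemma drain_spec : ∀ (n : Nat) (l : List Int), l.length = n + 1 → hOK l n →
    (↑(drain l n) : Multiset Int) = ↑(l.drop 1) ∧ (drain l n).Pairwise (· ≥ ·) := by
  intro n
  induction n with
  | zero =>
    intro l hlen _
    rw [drain_zero]
    have : l.drop 1 = [] := List.drop_eq_nil_of_le (by omega)
    rw [this]
    exact ⟨rfl, List.Pairwise.nil⟩
  | succ n ih =>
    intro l hlen hH
    obtain ⟨P1, P2, P3, P4, P5, P6⟩ := heapPop_spec l (n + 1) hlen (by omega) hH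
    have e2 : (heapPop l (n + 1)).2.2 = n := by simp [heapPop]
    rw [drain_succ]
    rw [e2]
    have hlen' : (heapPop l (n + 1)).2.1.length = n + 1 := by simpa using P2
    have hH' : hOK (heapPop l (n + 1)).2.1 n := by simpa using P3
    obtain ⟨ihms, ihpw⟩ := ih (heapPop l (n + 1)).2.1 hlen' hH'
    constructor
    · rw [← Multiset.cons_coe, ihms, P6]
      exact Multiset.cons_erase (Multiset.mem_coe.mpr P4)
    · rw [List.pairwise_cons]
      refine ⟨?_, ihpw⟩
      intro y hy
      have hy1 : y ∈ (↑((heapPop l (n + 1)).2.1.drop 1) : Multiset Int) := by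
        rw [← ihms]
        exact Multiset.mem_coe.mpr hy
      rw [P6] at hy1
      exact P5 y (Multiset.mem_coe.mp (Multiset.mem_of_mem_erase hy1))

-- ===== a pure model of the insertion loop: the kept elements as a sorted (≤) list =====

def mstep (limit : Int) (c : List Int) (x : Int) : List Int :=
  let c' := c.orderedInsert (· ≤ ·) x
  if limit < (c'.length : Int) then c'.dropLast else c'

def isort (xs : List Int) : List Int :=
  xs.foldl (fun c x => c.orderedInsert (· ≤ ·) x) []

def loopOK (st : List Int × Nat) (c : List Int) : Prop :=
  st.1.length = st.2 + 1 ∧ hOK st.1 st.2 ∧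
  (↑(st.1.drop 1) : Multiset Int) = ↑c ∧ c.length = st.2 ∧ c.Pairwise (· ≤ ·)

lemma step_inv (limit : Int) (st : List Int × Nat) (c : List Int) (x : Int)
    (h : loopOK st c) : loopOK (fcsStep limit st x) (mstep limit c x) := by
  obtain ⟨l, n⟩ := st
  obtain ⟨h1, h2, h3, h4, h5⟩ := h
  obtain ⟨_, Ilen, IH, Ims⟩ := heapInsert_spec l n x h1 h2
  have hclen : (c.orderedInsert (· ≤ ·) x).length = n + 1 := by
    rw [List.orderedInsert_length, h4]
  have hcms : (↑((heapInsert l n x).1.drop 1) : Multiset Int) = ↑(c.orderedInsert (· ≤ ·) x) := by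
    rw [Ims, h3]
    have e1 : (↑(c.orderedInsert (· ≤ ·) x) : Multiset Int) = x ::ₘ ↑c := by
      rw [Multiset.cons_coe]
      exact Multiset.coe_eq_coe.mpr (List.perm_orderedInsert _ x c)
    rw [e1, add_comm, Multiset.singleton_add]
  have hsorted : (c.orderedInsert (· ≤ ·) x).Pairwise (· ≤ ·) := by
    exact List.Pairwise.orderedInsert x c h5
  by_cases hpop : limit < ((n + 1 : Nat) : Int)
  · have efcs : fcsStep limit (l, n) x = (heapPop (heapInsert l n x).1 (n + 1)).2 := by
      have e2 : (heapInsert l n x).2 = n + 1 := rfl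
      simp only [fcsStep, e2]
      rw [if_pos hpop]
    have emst : mstep limit c x = (c.orderedInsert (· ≤ ·) x).dropLast := by
      simp only [mstep, hclen]
      rw [if_pos hpop]
    rw [efcs, emst]
    obtain ⟨P1, P2, P3, P4, P5, P6⟩ :=
      heapPop_spec (heapInsert l n x).1 (n + 1) Ilen (by omega) IH
    have hOInil : c.orderedInsert (· ≤ ·) x ≠ [] := by
      intro hnil
      rw [hnil] at hclen
      simp at hclen
    have hlast : ∀ y ∈ c.orderedInsert (· ≤ ·) x,
        y ≤ (c.orderedInsert (· ≤ ·) x).getLast hOInil := by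
      have hmono := List.pairwise_iff_getElem.mp hsorted
      intro y hy
      obtain ⟨idx, hidx, rfl⟩ := List.mem_iff_getElem.mp hy
      rw [List.getLast_eq_getElem]
      rcases Nat.lt_or_ge idx ((c.orderedInsert (· ≤ ·) x).length - 1) with hlt | hge
      · exact hmono idx _ hidx (by omega) hlt
      · have hie : idx = (c.orderedInsert (· ≤ ·) x).length - 1 := by omega
        subst hie
        exact le_refl _
    have hrmem : (heapPop (heapInsert l n x).1 (n + 1)).1 ∈ c.orderedInsert (· ≤ ·) x := by
      have hm : (heapPop (heapInsert l n x).1 (n + 1)).1 ∈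
          (↑((heapInsert l n x).1.drop 1) : Multiset Int) := Multiset.mem_coe.mpr P4
      rw [hcms] at hm
      exact Multiset.mem_coe.mp hm
    have hlastmem : (c.orderedInsert (· ≤ ·) x).getLast hOInil ∈ (heapInsert l n x).1.drop 1 := by
      have hm : (c.orderedInsert (· ≤ ·) x).getLast hOInil ∈
          (↑(c.orderedInsert (· ≤ ·) x) : Multiset Int) :=
        Multiset.mem_coe.mpr (List.getLast_mem hOInil)
      rw [← hcms] at hm
      exact Multiset.mem_coe.mp hm
    have hre : (heapPop (heapInsert l n x).1 (n + 1)).1 =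
        (c.orderedInsert (· ≤ ·) x).getLast hOInil :=
      le_antisymm (hlast _ hrmem) (P5 _ hlastmem)
    refine ⟨P2, P3, ?_, ?_, ?_⟩
    · rw [P6, hcms, hre]
      have hccons : (↑(c.orderedInsert (· ≤ ·) x) : Multiset Int) =
          (c.orderedInsert (· ≤ ·) x).getLast hOInil ::ₘ
            ↑((c.orderedInsert (· ≤ ·) x).dropLast) := by
        conv_lhs => rw [← List.dropLast_append_getLast hOInil]
        rw [Multiset.cons_coe]
        exact Multiset.coe_eq_coe.mpr (List.perm_append_singleton _ _)
      rw [hccons, Multiset.erase_cons_head]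
    · show (c.orderedInsert (· ≤ ·) x).dropLast.length = (n + 1) - 1
      rw [List.length_dropLast, hclen]
    · exact List.Pairwise.sublist (List.dropLast_sublist _) hsorted
  · have efcs : fcsStep limit (l, n) x = heapInsert l n x := by
      have e2 : (heapInsert l n x).2 = n + 1 := rfl
      simp only [fcsStep, e2]
      rw [if_neg hpop]
    have emst : mstep limit c x = c.orderedInsert (· ≤ ·) x := by
      simp only [mstep, hclen]
      rw [if_neg hpop]
    rw [efcs, emst]
    exact ⟨Ilen, IH, hcms, hclen, hsorted⟩

lemma loop_inv (limit : Int) : ∀ (xs : List Int) (st : List Int × Nat) (c : List Int),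
    loopOK st c → loopOK (xs.foldl (fcsStep limit) st) (xs.foldl (mstep limit) c) := by
  intro xs
  induction xs with
  | nil => intro st c h; simpa using h
  | cons x xs ih => intro st c h; exact ih _ _ (step_inv limit st c x h)

-- ===== the pure model computes take k of the sorted list =====

lemma dropLast_take_le (s : List Int) (m : Nat) (h : m < s.length) :
    (s.take (m + 1)).dropLast = s.take m := by
  rcases Nat.lt_or_ge (m + 1) s.length with hlt | hge
  · rw [List.dropLast_take hlt]
    simp
  · rw [List.take_of_length_le (by omega), List.dropLast_eq_take]
    congr 1
    omega

lemma OIT : ∀ (s : List Int) (j : Nat) (x : Int), j ≤ s.length →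
    ((s.take j).orderedInsert (· ≤ ·) x).dropLast = (s.orderedInsert (· ≤ ·) x).take j := by
  intro s
  induction s with
  | nil =>
    intro j x hj
    have : j = 0 := by simpa using hj
    subst this
    simp
  | cons a s' ih =>
    intro j x hj
    cases j with
    | zero => simp
    | succ m =>
      have hm : m ≤ s'.length := by simpa using hj
      by_cases hxa : x ≤ a
      · rw [List.take_succ_cons, List.orderedInsert_cons_of_le _ _ hxa,
          List.orderedInsert_cons_of_le _ _ hxa]
        rw [List.dropLast_cons₂, List.take_succ_cons]
        congr 1
        cases m with
        | zero => simp
        | succ p =>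
          have hne2 : s'.take (p + 1) ≠ [] := by
            have hlen2 : (s'.take (p + 1)).length = p + 1 := by
              rw [List.length_take]
              omega
            intro hnil
            rw [hnil] at hlen2
            simp at hlen2
          rw [List.dropLast_cons_of_ne_nil hne2, List.take_succ_cons,
            dropLast_take_le s' p (by omega)]
      · rw [List.take_succ_cons, List.orderedInsert_of_not_le _ _ hxa,
          List.orderedInsert_of_not_le _ _ hxa, List.take_succ_cons]
        have hOInil : (s'.take m).orderedInsert (· ≤ ·) x ≠ [] := by
          intro hnil
          have hln := congrArg List.length hnil
          rw [List.orderedInsert_length] at hln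
          simp at hln
        rw [List.dropLast_cons_of_ne_nil hOInil]
        congr 1
        exact ih m x hm

lemma model_eq (limit : Int) : ∀ xs : List Int,
    xs.foldl (mstep limit) [] = (isort xs).take (max limit 0).toNat := by
  intro xs
  induction xs using List.reverseRecOn with
  | nil => simp [isort]
  | append_singleton xs x ih =>
    have hisort : isort (xs ++ [x]) = (isort xs).orderedInsert (· ≤ ·) x := by
      simp [isort, List.foldl_append]
    rw [List.foldl_append, List.foldl_cons, List.foldl_nil, ih, hisort]
    by_cases hk : (isort xs).length < (max limit 0).toNat
    · have htake : (isort xs).take (max limit 0).toNat = isort xs :=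
        List.take_of_length_le (by omega)
      rw [htake]
      have hnc : ¬ limit < (((isort xs).orderedInsert (· ≤ ·) x).length : Int) := by
        rw [List.orderedInsert_length]
        omega
      simp only [mstep]
      rw [if_neg hnc]
      exact (List.take_of_length_le (by rw [List.orderedInsert_length]; omega)).symm
    · have hk' : (max limit 0).toNat ≤ (isort xs).length := by omega
      have hlen : ((isort xs).take (max limit 0).toNat).length = (max limit 0).toNat := by
        simp [hk']
      have hc : limit <
          ((((isort xs).take (max limit 0).toNat).orderedInsert (· ≤ ·) x).length : Int) := by
        rw [List.orderedInsert_length, hlen]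
        omega
      simp only [mstep]
      rw [if_pos hc]
      exact OIT (isort xs) (max limit 0).toNat x hk'

lemma isort_perm (xs : List Int) : List.Perm (isort xs) xs := by
  induction xs using List.reverseRecOn with
  | nil => simp [isort]
  | append_singleton xs x ih =>
    have hisort : isort (xs ++ [x]) = (isort xs).orderedInsert (· ≤ ·) x := by
      simp [isort, List.foldl_append]
    rw [hisort]
    exact ((List.perm_orderedInsert _ x _).trans (ih.cons x)).trans
      (List.perm_append_singleton x xs).symm

lemma isort_sorted (xs : List Int) : (isort xs).Pairwise (· ≤ ·) := by
  induction xs using List.reverseRecOn with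
  | nil => simp [isort]
  | append_singleton xs x ih =>
    have hisort : isort (xs ++ [x]) = (isort xs).orderedInsert (· ≤ ·) x := by
      simp [isort, List.foldl_append]
    rw [hisort]
    exact List.Pairwise.orderedInsert x (isort xs) ih

lemma isort_eq_sorted (xs : List Int) :
    PySem.List.sorted xs (fun x => x) false = isort xs :=
  PySem.List.sorted_id_eq_of_perm_of_pairwise xs (isort xs) (isort_perm xs) (isort_sorted xs)

-- ===== VERDICT (by name: the statement is the Claim_ definition above) =====
theorem find_closest_stars_spec : Claim_equal_find_closest_stars := by
  intro limit stars _
  show find_closest_stars limit stars = find_closest_stars_alt limit stars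
  have base : loopOK ([0], 0) [] := by
    refine ⟨rfl, ?_, rfl, rfl, List.Pairwise.nil⟩
    intro j hj2 hj0
    exact absurd (le_trans hj2 hj0) (by omega)
  obtain ⟨L1, L2, L3, L4, L5⟩ := loop_inv limit stars ([0], 0) [] base
  obtain ⟨Dms, Dpw⟩ := drain_spec (stars.foldl (fcsStep limit) ([0], 0)).2
    (stars.foldl (fcsStep limit) ([0], 0)).1 L1 L2
  show drain (stars.foldl (fcsStep limit) ([0], 0)).1 (stars.foldl (fcsStep limit) ([0], 0)).2 =
    ((PySem.List.sorted stars (fun x => x) false).take (max limit 0).toNat).reverse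
  rw [isort_eq_sorted]
  have hperm : List.Perm (drain (stars.foldl (fcsStep limit) ([0], 0)).1
      (stars.foldl (fcsStep limit) ([0], 0)).2)
      (((isort stars).take (max limit 0).toNat).reverse) := by
    apply Multiset.coe_eq_coe.mp
    rw [Multiset.coe_reverse, Dms, L3, model_eq limit stars]
  have hpwB : (((isort stars).take (max limit 0).toNat).reverse).Pairwise (· ≥ ·) := by
    rw [List.pairwise_reverse]
    exact List.Pairwise.sublist (List.take_sublist _ _) (isort_sorted stars)
  exact hperm.eq_of_pairwise (fun a b _ _ hab hba => le_antisymm hba hab) Dpw hpwB
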